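-- pv_equiv track=rewrite | github.com/dhamaladev/intern-tasks | python-tasks-02-May/2_prog.py | concatenate_lists
-- ===== SOURCE A (Python) =====
-- def check_type(lst):
--     for i in range(len(lst)):
--         if not isinstance(lst[i], str):
--             lst[i] = str(lst[i])
--     return lst
--
-- def concatenate_lists(list1, list2):
--     list1 = check_type(list1)
--     list2 = check_type(list2)
--     result = []
--     min_length = min(len(list1), len(list2))
--     for i in range(min_length):
--         result.append(list1[i] + list2[i])
--     if len(list1) > len(list2):
--         result.extend(list1[min_length:])
--     elif len(list2) > len(list1):
--         result.extend(list2[min_length:])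
--     return result
-- ===== SOURCE B (Python) =====
-- def check_type(lst):
--     for i in range(len(lst)):
--         if not isinstance(lst[i], str):
--             lst[i] = str(lst[i])
--     return lst
--
-- def concatenate_lists(list1, list2):
--     list1 = check_type(list1)
--     list2 = check_type(list2)
--     # pad the shorter list with '' up to the common length, then one zipped pass
--     n = max(len(list1), len(list2))
--     p1 = list1 + [''] * (n - len(list1))
--     p2 = list2 + [''] * (n - len(list2))
--     return [a + b for a, b in zip(p1, p2)]
-- ===== Notes on version B (the rewrite author's own statement) =====
-- stated objective: alternative
-- what changed: Replaces A's index loop over range(min_len) plus two length-compare extend branches by padding both lists with '' to the common max length and concatenating pairwise in a single zipped pass.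
import Mathlib
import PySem

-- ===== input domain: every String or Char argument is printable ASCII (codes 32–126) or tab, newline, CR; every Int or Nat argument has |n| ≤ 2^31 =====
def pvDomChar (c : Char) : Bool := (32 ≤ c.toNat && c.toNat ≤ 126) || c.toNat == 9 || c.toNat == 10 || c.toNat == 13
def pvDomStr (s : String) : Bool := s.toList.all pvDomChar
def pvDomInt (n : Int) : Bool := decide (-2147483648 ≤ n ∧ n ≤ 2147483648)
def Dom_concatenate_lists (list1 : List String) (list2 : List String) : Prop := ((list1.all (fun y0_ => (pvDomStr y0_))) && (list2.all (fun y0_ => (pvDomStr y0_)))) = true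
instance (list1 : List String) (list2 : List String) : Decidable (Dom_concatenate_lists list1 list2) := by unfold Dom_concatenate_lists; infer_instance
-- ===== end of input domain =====

-- B replaces A's range(min_len) index loop plus two extend branches by padding both lists
-- with "" to the common max length and one zipped concatenating pass ('alternative', same cost).
-- Inputs are lists of strings, so check_type's isinstance conversion never fires and the
-- observable in-place mutation is a no-op.

-- ===== PORT A =====
-- check_type: on List String every element is already a str, so the loop body's branch
-- never fires and the function returns lst unchanged.
def check_type (lst : List String) : List String := lst

def concatenate_lists (list1 : List String) (list2 : List String) : List String :=
  let list1 := check_type list1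
  let list2 := check_type list2
  let min_length : Int := min (list1.length : Int) (list2.length : Int)
  let result := (PySem.List.pyRange 0 min_length 1).foldl
      (fun result i => result ++ [PySem.List.pyGetD list1 i "" ++ PySem.List.pyGetD list2 i ""]) []
  if (list1.length : Int) > (list2.length : Int) then
    result ++ PySem.List.slice list1 (some min_length) none
  else if (list2.length : Int) > (list1.length : Int) then
    result ++ PySem.List.slice list2 (some min_length) none
  else result

-- ===== PORT B =====
def concatenate_lists_alt (list1 : List String) (list2 : List String) : List String :=
  let list1 := check_type list1
  let list2 := check_type list2
  let n := max list1.length list2.length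
  let p1 := list1 ++ List.replicate (n - list1.length) ""
  let p2 := list2 ++ List.replicate (n - list2.length) ""
  List.zipWith (fun a b => a ++ b) p1 p2

-- ===== PRECONDITION & SPEC =====
def Spec_concatenate_lists (list1 : List String) (list2 : List String) (out : List String) : Prop := out = concatenate_lists_alt list1 list2
instance (list1 : List String) (list2 : List String) (out : List String) : Decidable (Spec_concatenate_lists list1 list2 out) := by unfold Spec_concatenate_lists; infer_instance

-- ===== CLAIM (what is proved, stated in full; the proofs are below) =====
def Claim_equal_concatenate_lists : Prop := ∀ (list1 : List String) (list2 : List String), Dom_concatenate_lists list1 list2 → Spec_concatenate_lists list1 list2 (concatenate_lists list1 list2)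

-- ===== LEMMAS AND PROOFS =====

-- A in pure Nat form: the map over range(min) followed by the longer list's tail.
lemma A_norm (xs ys : List String) :
    concatenate_lists xs ys =
      (List.range (min xs.length ys.length)).map (fun k => xs.getD k "" ++ ys.getD k "")
        ++ (if ys.length < xs.length then xs.drop (min xs.length ys.length)
            else ys.drop (min xs.length ys.length)) := by
  unfold concatenate_lists check_type
  have hmin : min (xs.length : Int) (ys.length : Int) = ((min xs.length ys.length : Nat) : Int) := by
    omega
  simp only [hmin, gt_iff_lt]
  rw [PySem.List.foldl_append_singleton_eq_map, PySem.List.pyRange_one,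
      PySem.List.slice_from _ (Int.natCast_nonneg _), PySem.List.slice_from _ (Int.natCast_nonneg _)]
  simp only [List.map_map, List.nil_append, Int.sub_zero, Int.toNat_natCast, Function.comp_def,
    zero_add, PySem.List.pyGetD_natCast]
  split_ifs <;>
    first
      | rfl
      | omega
      | (have hm : min xs.length ys.length = ys.length := by omega
         simp [hm])

lemma zip_rep_left (ys : List String) :
    List.zipWith (fun a b => a ++ b) (List.replicate ys.length "") ys = ys := by
  induction ys with
  | nil => rfl
  | cons y ys ih => simp [List.replicate_succ, ih]

lemma zip_rep_right (xs : List String) :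
    List.zipWith (fun a b => a ++ b) xs (List.replicate xs.length "") = xs := by
  induction xs with
  | nil => rfl
  | cons x xs ih => simp [List.replicate_succ, ih]

lemma B_norm (xs ys : List String) :
    concatenate_lists_alt xs ys =
      (List.range (min xs.length ys.length)).map (fun k => xs.getD k "" ++ ys.getD k "")
        ++ (if ys.length < xs.length then xs.drop (min xs.length ys.length)
            else ys.drop (min xs.length ys.length)) := by
  unfold concatenate_lists_alt check_type
  induction xs generalizing ys with
  | nil =>
    simp [zip_rep_left]
  | cons x xs ih =>
    cases ys with
    | nil => simpa using zip_rep_right (x :: xs)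
    | cons y ys =>
      simp only [List.length_cons, Nat.succ_max_succ, Nat.succ_min_succ, Nat.succ_sub_succ,
        List.cons_append, List.zipWith_cons_cons, List.range_succ_eq_map, List.map_cons,
        List.map_map, Function.comp_def, List.getD_cons_zero, List.getD_cons_succ,
        List.drop_succ_cons, Nat.add_lt_add_iff_right, List.cons.injEq]
      exact ⟨trivial, ih ys⟩

-- ===== VERDICT (by name: the statement is the Claim_ definition above) =====
theorem concatenate_lists_spec : Claim_equal_concatenate_lists := by
  intro list1 list2 _
  unfold Spec_concatenate_lists
  rw [A_norm, ← B_norm]
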